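-- pv_equiv track=rewrite | github.com/wyk18703232953/myResearch | codeComplex/data/filteredData/python/linear/python_linear_0016.py | solve
-- ===== SOURCE A (Python) =====
-- def f(n):
--     k = 2
--     while k * k <= n:
--         if n % k == 0:
--             return False
--         k += 1
--     return True
--
-- def solve(n, k):
--     a = []
--     x = 0
--     for i in range(2, n + 1):
--         if f(i):
--             a.append(i)
--     for i in range(len(a) - 2):
--         if a[i] + a[i + 1] + 1 in a:
--             x += 1
--     if x >= k:
--         return "YES"
--     else:
--         return "NO"
-- ===== SOURCE B (Python) =====
-- def solve(n, k):
--     limit = n + 1 if n + 1 > 2 else 2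
--     sieve = [True] * limit
--     sieve[0] = False
--     sieve[1] = False
--     p = 2
--     while p * p < limit:
--         if sieve[p]:
--             for m in range(p * p, limit, p):
--                 sieve[m] = False
--         p += 1
--     primes = [i for i in range(2, limit) if sieve[i]]
--     x = 0
--     for j in range(len(primes) - 1):
--         if primes[j] + primes[j + 1] + 1 < limit and sieve[primes[j] + primes[j + 1] + 1]:
--             x += 1
--     return "YES" if x >= k else "NO"
-- ===== Notes on version B (the rewrite author's own statement) =====
-- stated objective: faster
-- what changed: B replaces A's per-number trial division and per-pair linear list-membership scan with a Sieve of Eratosthenes boolean table built once; both prime generation and the sum+1 primality check become O(1) table lookups.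
import Mathlib
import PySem

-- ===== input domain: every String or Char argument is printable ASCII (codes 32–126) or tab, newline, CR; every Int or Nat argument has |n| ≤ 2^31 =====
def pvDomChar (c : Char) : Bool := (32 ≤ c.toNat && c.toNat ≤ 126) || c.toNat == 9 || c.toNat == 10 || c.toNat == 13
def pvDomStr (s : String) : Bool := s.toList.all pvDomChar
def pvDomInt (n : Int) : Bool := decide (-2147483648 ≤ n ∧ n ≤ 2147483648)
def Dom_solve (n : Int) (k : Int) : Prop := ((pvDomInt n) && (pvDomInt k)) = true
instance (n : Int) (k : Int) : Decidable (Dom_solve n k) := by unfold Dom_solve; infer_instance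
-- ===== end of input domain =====

-- B replaces A's trial-division primality test and per-pair linear membership scan by a
-- Sieve of Eratosthenes boolean table, consulted for both steps (objective: faster).

-- an integer is at most its square (used only for termination of the two loops below)
lemma int_le_mul_self (p : Int) : p ≤ p * p := by nlinarith [sq_nonneg (p - 1)]

-- ===== PORT A =====
-- while k * k <= n: … (k only grows; k ≤ n whenever k*k ≤ n, so n+1-k decreases)
def fAux (n : Int) (k : Int) : Bool :=
  if h : k * k ≤ n then
    if PySem.Int.mod n k = 0 then false else fAux n (k + 1)
  else true
termination_by (n + 1 - k).toNat
decreasing_by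
  have hk : k ≤ n := le_trans (int_le_mul_self k) h
  omega

def f (n : Int) : Bool := fAux n 2

def solve (n : Int) (k : Int) : String :=
  let a := (PySem.List.pyRange 2 (n + 1) 1).foldl
      (fun acc i => if f i then acc ++ [i] else acc) []
  let x := (PySem.List.pyRange 0 ((a.length : Int) - 2) 1).foldl
      (fun x i =>
        if PySem.List.pyGetD a i 0 + PySem.List.pyGetD a (i + 1) 0 + 1 ∈ a then x + 1 else x)
      (0 : Int)
  if x ≥ k then "YES" else "NO"

-- ===== PORT B =====
-- inner loop 'for m in range(p*p, limit, p): sieve[m] = False'; every index m is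
-- nonnegative and < limit = len(sieve), so List.set on m.toNat is exact
def sieveMark (limit : Int) (s : List Bool) (p : Int) : List Bool :=
  (PySem.List.pyRange (p * p) limit p).foldl (fun acc m => acc.set m.toNat false) s

-- outer while loop 'while p * p < limit: …; p += 1'
def sieveLoop (limit : Int) (s : List Bool) (p : Int) : List Bool :=
  if h : p * p < limit then
    if s.getD p.toNat false then
      sieveLoop limit (sieveMark limit s p) (p + 1)
    else
      sieveLoop limit s (p + 1)
  else s
termination_by (limit - p).toNat
decreasing_by
  all_goals
    have hpl : p < limit := lt_of_le_of_lt (int_le_mul_self p) h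
    omega

def solve_alt (n : Int) (k : Int) : String :=
  let limit := if 2 < n + 1 then n + 1 else 2
  let sieve := sieveLoop limit (((List.replicate limit.toNat true).set 0 false).set 1 false) 2
  let primes := (PySem.List.pyRange 2 limit 1).filter (fun i => sieve.getD i.toNat false)
  let x := (PySem.List.pyRange 0 ((primes.length : Int) - 1) 1).foldl
      (fun x j =>
        if PySem.List.pyGetD primes j 0 + PySem.List.pyGetD primes (j + 1) 0 + 1 < limit ∧
            sieve.getD (PySem.List.pyGetD primes j 0 + PySem.List.pyGetD primes (j + 1) 0 + 1).toNat false = true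
        then x + 1 else x)
      (0 : Int)
  if x ≥ k then "YES" else "NO"

-- ===== PRECONDITION & SPEC =====
def Spec_solve (n : Int) (k : Int) (out : String) : Prop := out = solve_alt n k
instance (n : Int) (k : Int) (out : String) : Decidable (Spec_solve n k out) := by unfold Spec_solve; infer_instance

-- ===== CLAIM =====
def Claim_equal_solve : Prop := ∀ (n : Int) (k : Int), Dom_solve n k → Spec_solve n k (solve n k)

-- ===== LEMMAS AND PROOFS =====

lemma fAux_iff (n k : Int) (hk : 0 ≤ k) :
    fAux n k = true ↔ ∀ j : Int, k ≤ j → j * j ≤ n → ¬ (j ∣ n) := by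
  fun_induction fAux n k with
  | case1 k h hmod =>
    simp only [Bool.false_eq_true, false_iff, not_forall]
    exact ⟨k, le_refl k, h, by simpa using (PySem.Int.mod_eq_zero_iff_dvd n k).mp hmod⟩
  | case2 k h hmod ih =>
    rw [ih (by omega)]
    constructor
    · intro H j hj hjj
      by_cases hjk : j = k
      · subst hjk; exact fun hd => hmod ((PySem.Int.mod_eq_zero_iff_dvd n j).mpr hd)
      · exact H j (by omega) hjj
    · intro H j hj hjj
      exact H j (by omega) hjj
  | case3 k h =>
    simp only [true_iff]
    intro j hj hjj
    exact absurd hjj (by intro hc; exact h (by nlinarith [sq_nonneg j]))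

-- "q has no divisor d with 2 ≤ d and d*d ≤ q", i.e. exactly A's trial-division condition
def Qprime (q : Int) : Prop := ∀ j : Int, 2 ≤ j → j * j ≤ q → ¬ (j ∣ q)

lemma exists_qprime_witness_aux (m : Int) :
    ∀ (N : Nat) (j : Int), j.toNat ≤ N → 2 ≤ j → j * j ≤ m → j ∣ m →
      ∃ q, 2 ≤ q ∧ q * q ≤ m ∧ q ∣ m ∧ Qprime q := by
  intro N
  induction N with
  | zero => intro j hN h2 _ _; omega
  | succ N ih =>
    intro j hN h2 hjj hdvd
    by_cases hq : Qprime j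
    · exact ⟨j, h2, hjj, hdvd, hq⟩
    · unfold Qprime at hq
      push Not at hq
      obtain ⟨e, he2, hee, hed⟩ := hq
      have hej : e < j := by nlinarith [sq_nonneg (e - 1)]
      have hem : e * e ≤ m := by nlinarith [sq_nonneg (j - 1)]
      exact ih e (by omega) he2 hem (hed.trans hdvd)

lemma exists_qprime_witness (m j : Int) (h2 : 2 ≤ j) (hjj : j * j ≤ m) (hdvd : j ∣ m) :
    ∃ q, 2 ≤ q ∧ q * q ≤ m ∧ q ∣ m ∧ Qprime q :=
  exists_qprime_witness_aux m j.toNat j (le_refl _) h2 hjj hdvd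

lemma qprime_iff_no_small (p : Int) :
    (¬ ∃ q, 2 ≤ q ∧ q < p ∧ q * q ≤ p ∧ q ∣ p ∧ Qprime q) ↔ Qprime p := by
  constructor
  · intro h j hj2 hjj hjd
    obtain ⟨q, hq2, hqq, hqd, hqp⟩ := exists_qprime_witness p j hj2 hjj hjd
    have hqlt : q < p := by nlinarith [sq_nonneg (q - 1)]
    exact h ⟨q, hq2, hqlt, hqq, hqd, hqp⟩
  · rintro hQ ⟨q, hq2, _, hqq, hqd, _⟩
    exact hQ q hq2 hqq hqd

lemma length_foldl_set (L : List Int) (s : List Bool) :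
    (L.foldl (fun acc m => acc.set m.toNat false) s).length = s.length := by
  induction L generalizing s with
  | nil => rfl
  | cons a t ih => rw [List.foldl_cons, ih, List.length_set]

lemma getD_set' (s : List Bool) (i j : Nat) (v : Bool) :
    (s.set i v).getD j false = if i = j ∧ j < s.length then v else s.getD j false := by
  by_cases h : i = j ∧ j < s.length
  · obtain ⟨rfl, hlt⟩ := h
    rw [if_pos ⟨rfl, hlt⟩, List.getD_eq_getElem _ _ (by simpa using hlt), List.getElem_set_self]
  · rw [if_neg h]
    by_cases hij : i = j
    · subst hij
      have hlen : ¬ i < s.length := fun hc => h ⟨rfl, hc⟩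
      rw [List.getD_eq_default _ _ (by simpa using hlen), List.getD_eq_default _ _ (by omega)]
    · simp [List.getD_eq_getElem?_getD, List.getElem?_set_ne hij]

lemma getD_foldl_set (L : List Int) (s : List Bool) (j : Nat) (hj : j < s.length)
    (hL : ∀ m ∈ L, 0 ≤ m) :
    (L.foldl (fun acc m => acc.set m.toNat false) s).getD j false
      = if (j : Int) ∈ L then false else s.getD j false := by
  induction L generalizing s with
  | nil => simp
  | cons a t ih =>
    rw [List.foldl_cons, ih _ (by rw [List.length_set]; exact hj)
        (fun m hm => hL m (List.mem_cons_of_mem _ hm))]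
    have ha : 0 ≤ a := hL a List.mem_cons_self
    by_cases hjt : (j : Int) ∈ t
    · rw [if_pos hjt, if_pos (List.mem_cons_of_mem a hjt)]
    · rw [if_neg hjt, getD_set']
      by_cases hja : (j : Int) = a
      · have haj : a.toNat = j := by omega
        rw [if_pos ⟨haj, hj⟩, if_pos (by rw [hja]; exact List.mem_cons_self)]
      · have haj : ¬ (a.toNat = j ∧ j < s.length) := fun hc => hja (by omega)
        rw [if_neg haj, if_neg (by simp [List.mem_cons, hja, hjt])]

lemma sieveMark_getD (limit p : Int) (hp : 0 < p) (s : List Bool) (m : Int)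
    (hm : 0 ≤ m) (hml : m.toNat < s.length) :
    (sieveMark limit s p).getD m.toNat false
      = if p * p ≤ m ∧ m < limit ∧ p ∣ m then false else s.getD m.toNat false := by
  rw [sieveMark, getD_foldl_set _ _ _ hml
      (fun x hx => by
        have h := (PySem.List.mem_pyRange_iff_of_pos hp x).mp hx
        nlinarith [h.1, sq_nonneg p])]
  have hcast : ((m.toNat : Nat) : Int) = m := Int.toNat_of_nonneg hm
  have hiff : ((m.toNat : Nat) : Int) ∈ PySem.List.pyRange (p * p) limit p
      ↔ (p * p ≤ m ∧ m < limit ∧ p ∣ m) := by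
    rw [PySem.List.mem_pyRange_iff_of_pos hp, hcast]
    constructor
    · rintro ⟨h1, h2, h3⟩
      refine ⟨h1, h2, ?_⟩
      have := dvd_add h3 (Dvd.intro p rfl)
      simpa using this
    · rintro ⟨h1, h2, h3⟩
      exact ⟨h1, h2, dvd_sub h3 (Dvd.intro p rfl)⟩
  rw [if_congr hiff rfl rfl]

lemma sieveLoop_getD (limit : Int) (s : List Bool) (p : Int) :
    2 ≤ p → s.length = limit.toNat →
    (∀ m : Int, 0 ≤ m → m < limit →
      (s.getD m.toNat false = true ↔
        2 ≤ m ∧ ¬ ∃ q, 2 ≤ q ∧ q < p ∧ q * q ≤ m ∧ q ∣ m ∧ Qprime q)) →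
    ∀ m : Int, 0 ≤ m → m < limit →
      ((sieveLoop limit s p).getD m.toNat false = true ↔
        2 ≤ m ∧ ¬ ∃ q, 2 ≤ q ∧ q * q ≤ m ∧ q ∣ m ∧ Qprime q) := by
  fun_induction sieveLoop limit s p with
  | case1 s p hlt hsp ih =>
    intro hp hlen hs
    have hpp : p ≤ p * p := by nlinarith
    have hplim : p < limit := by omega
    -- sieve[p] is true, so by the invariant p satisfies Qprime
    have hQp : Qprime p := by
      have := (hs p (by omega) hplim).mp hsp
      exact (qprime_iff_no_small p).mp this.2
    apply ih (by omega)
    · rw [sieveMark, length_foldl_set]; exact hlen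
    · intro m hm0 hml
      rw [sieveMark_getD limit p (by omega) s m hm0 (by omega)]
      by_cases hc : p * p ≤ m ∧ m < limit ∧ p ∣ m
      · rw [if_pos hc]
        simp only [Bool.false_eq_true, false_iff]
        rintro ⟨_, hno⟩
        exact hno ⟨p, hp, by omega, hc.1, hc.2.2, hQp⟩
      · rw [if_neg hc, hs m hm0 hml]
        constructor
        · rintro ⟨h2m, hno⟩
          refine ⟨h2m, ?_⟩
          rintro ⟨q, hq2, hqlt, hqq, hqd, hqp⟩
          by_cases hqp' : q = p
          · subst hqp'; exact hc ⟨hqq, hml, hqd⟩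
          · exact hno ⟨q, hq2, by omega, hqq, hqd, hqp⟩
        · rintro ⟨h2m, hno⟩
          exact ⟨h2m, fun ⟨q, hq2, hqlt, hqq, hqd, hqp⟩ =>
            hno ⟨q, hq2, by omega, hqq, hqd, hqp⟩⟩
  | case2 s p hlt hsp ih =>
    intro hp hlen hs
    have hpp : p ≤ p * p := by nlinarith
    have hplim : p < limit := by omega
    -- sieve[p] is false, so p already has a Qprime divisor, hence ¬ Qprime p
    have hnotQp : ¬ Qprime p := by
      have h := hs p (by omega) hplim
      have hfalse : ¬ (2 ≤ p ∧ ¬ ∃ q, 2 ≤ q ∧ q < p ∧ q * q ≤ p ∧ q ∣ p ∧ Qprime q) :=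
        fun hc => hsp (h.mpr hc)
      rw [← qprime_iff_no_small p]
      intro hno
      exact hfalse ⟨hp, hno⟩
    apply ih (by omega) hlen
    intro m hm0 hml
    rw [hs m hm0 hml]
    constructor
    · rintro ⟨h2m, hno⟩
      refine ⟨h2m, ?_⟩
      rintro ⟨q, hq2, hqlt, hqq, hqd, hqp⟩
      by_cases hqp' : q = p
      · subst hqp'; exact hnotQp hqp
      · exact hno ⟨q, hq2, by omega, hqq, hqd, hqp⟩
    · rintro ⟨h2m, hno⟩
      exact ⟨h2m, fun ⟨q, hq2, hqlt, hqq, hqd, hqp⟩ =>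
        hno ⟨q, hq2, by omega, hqq, hqd, hqp⟩⟩
  | case3 s p hnlt =>
    intro hp hlen hs m hm0 hml
    rw [hs m hm0 hml]
    constructor
    · rintro ⟨h2m, hno⟩
      exact ⟨h2m, fun ⟨q, hq2, hqq, hqd, hqp⟩ =>
        hno ⟨q, hq2, by nlinarith, hqq, hqd, hqp⟩⟩
    · rintro ⟨h2m, hno⟩
      exact ⟨h2m, fun ⟨q, hq2, _, hqq, hqd, hqp⟩ => hno ⟨q, hq2, hqq, hqd, hqp⟩⟩

lemma sieve0_getD (limit : Int) (h2 : 2 ≤ limit) (m : Int) (h0 : 0 ≤ m) (hm : m < limit) :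
    (((List.replicate limit.toNat true).set 0 false).set 1 false).getD m.toNat false
      = decide (2 ≤ m) := by
  have hlen0 : (List.replicate limit.toNat true).length = limit.toNat := by simp
  have hlen1 : ((List.replicate limit.toNat true).set 0 false).length = limit.toNat := by simp
  rw [getD_set', hlen1, getD_set', hlen0]
  have hmN : m.toNat < limit.toNat := by omega
  by_cases h1 : m = 1
  · subst h1
    rw [if_pos (⟨by omega, by omega⟩ : (1:Nat) = (1:Int).toNat ∧ (1:Int).toNat < limit.toNat)]
    simp
  · rw [if_neg (by omega : ¬ ((1:Nat) = m.toNat ∧ m.toNat < limit.toNat))]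
    by_cases hz : m = 0
    · subst hz
      rw [if_pos (⟨by omega, by omega⟩ : (0:Nat) = (0:Int).toNat ∧ (0:Int).toNat < limit.toNat)]
      simp
    · rw [if_neg (by omega : ¬ ((0:Nat) = m.toNat ∧ m.toNat < limit.toNat))]
      rw [List.getD_eq_getElem _ _ (by simpa using hmN), List.getElem_replicate]
      exact (decide_eq_true (by omega : (2:Int) ≤ m)).symm

lemma sieve_eq_f (limit : Int) (h2 : 2 ≤ limit) (m : Int) (h2m : 2 ≤ m) (hml : m < limit) :
    (sieveLoop limit (((List.replicate limit.toNat true).set 0 false).set 1 false) 2).getD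
      m.toNat false = f m := by
  have hpost := sieveLoop_getD limit
      (((List.replicate limit.toNat true).set 0 false).set 1 false) 2 (le_refl 2)
      (by simp)
      (by
        intro m' h0' hm'
        rw [sieve0_getD limit h2 m' h0' hm']
        simp only [decide_eq_true_eq]
        constructor
        · intro h; exact ⟨h, fun ⟨q, hq2, hqlt, _⟩ => by omega⟩
        · rintro ⟨h, _⟩; exact h)
      m (by omega) hml
  have hf : f m = true ↔ ∀ j : Int, 2 ≤ j → j * j ≤ m → ¬ (j ∣ m) := fAux_iff m 2 (by omega)
  rw [Bool.eq_iff_iff, hpost, hf]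
  constructor
  · rintro ⟨_, hno⟩ j hj hjj hdvd
    exact hno (exists_qprime_witness m j hj hjj hdvd)
  · intro hall
    exact ⟨h2m, fun ⟨q, hq2, hqq, hqd, _⟩ => hall q hq2 hqq hqd⟩

lemma foldl_index_pairs (L : List Int) (C : Int → Int → Prop) [inst : ∀ a b, Decidable (C a b)]
    (m : Nat) (hm : m + 1 ≤ L.length) (x0 : Int) :
    (PySem.List.pyRange 0 (m : Int) 1).foldl
        (fun x i =>
          if C (PySem.List.pyGetD L i 0) (PySem.List.pyGetD L (i + 1) 0) then x + 1 else x) x0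
      = x0 + ((L.zip L.tail).take m).countP (fun pq => decide (C pq.1 pq.2)) := by
  induction m with
  | zero => simp [PySem.List.pyRange_one_eq_nil]
  | succ m ih =>
    have hcast : ((m + 1 : Nat) : Int) = (m : Int) + 1 := by push_cast; ring
    rw [hcast, PySem.List.pyRange_one_succ_right (by positivity), List.foldl_append,
      ih (by omega)]
    have hzlen : m < (L.zip L.tail).length := by
      simp [List.length_zip, List.length_tail]; omega
    have htake : (L.zip L.tail).take (m + 1)
        = (L.zip L.tail).take m ++ [(L.zip L.tail)[m]] := by
      rw [List.take_add_one, List.getElem?_eq_getElem hzlen]; rfl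
    have hz : (L.zip L.tail)[m] = (L[m]'(by omega), L[m+1]'(by omega)) := by
      rw [List.getElem_zip]
      congr 1
      rw [List.getElem_tail]
    have hg1 : PySem.List.pyGetD L ((m : Nat) : Int) 0 = L[m]'(by omega) := by
      rw [PySem.List.pyGetD_natCast, List.getD_eq_getElem _ _ (by omega)]
    have hg2 : PySem.List.pyGetD L (((m : Nat) : Int) + 1) 0 = L[m+1]'(by omega) := by
      rw [show ((m : Nat) : Int) + 1 = ((m + 1 : Nat) : Int) by push_cast; ring,
        PySem.List.pyGetD_natCast, List.getD_eq_getElem _ _ (by omega)]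
    rw [htake, List.countP_append]
    simp only [List.foldl_cons, List.foldl_nil, hg1, hg2, hz, List.countP_cons,
      List.countP_nil]
    by_cases hC : C (L[m]'(by omega)) (L[m+1]'(by omega))
    · rw [if_pos hC]; simp [hC]; ring
    · rw [if_neg hC]; simp [hC]

lemma solve_spec_aux (n k : Int) : solve n k = solve_alt n k := by
  simp only [solve, solve_alt]
  rw [PySem.List.foldl_append_if_eq_filter, List.nil_append]
  set lim : Int := if 2 < n + 1 then n + 1 else 2 with hlim
  set sieveF : List Bool :=
    sieveLoop lim (((List.replicate lim.toNat true).set 0 false).set 1 false) 2 with hsF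
  have hlim2 : (2:Int) ≤ lim := by rw [hlim]; split <;> omega
  set L := (PySem.List.pyRange 2 (n + 1) 1).filter f with hLdef
  have hsieve_f : ∀ i : Int, 2 ≤ i → i < lim → sieveF.getD i.toNat false = f i := by
    intro i h2i hil
    rw [hsF]
    exact sieve_eq_f lim hlim2 i h2i hil
  have hrange : PySem.List.pyRange 2 lim 1 = PySem.List.pyRange 2 (n + 1) 1 := by
    rw [hlim]
    by_cases hbig : 2 < n + 1
    · rw [if_pos hbig]
    · rw [if_neg hbig, PySem.List.pyRange_one_eq_nil (le_refl 2),
        PySem.List.pyRange_one_eq_nil (by omega)]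
  have hprimes : (PySem.List.pyRange 2 lim 1).filter (fun i => sieveF.getD i.toNat false) = L := by
    rw [hrange, hLdef]
    apply List.filter_congr
    intro i hi
    obtain ⟨h2i, hilt⟩ := PySem.List.mem_pyRange_one.mp hi
    have hlimeq : lim = n + 1 := by rw [hlim, if_pos (by omega)]
    exact hsieve_f i h2i (by omega)
  rw [hprimes]
  have hmemL : ∀ x, x ∈ L ↔ 2 ≤ x ∧ x < n + 1 ∧ f x = true := by
    intro x
    rw [hLdef, List.mem_filter, PySem.List.mem_pyRange_one]
    tauto
  have hge2 : ∀ x ∈ L, 2 ≤ x := fun x hx => ((hmemL x).mp hx).1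
  have hsort : L.Pairwise (· < ·) := by
    rw [hLdef]; exact (PySem.List.pairwise_lt_pyRange_one 2 (n + 1)).filter _
  have hcond : ∀ pq ∈ L.zip L.tail,
      ((pq.1 + pq.2 + 1 ∈ L) ↔
        (pq.1 + pq.2 + 1 < lim ∧ sieveF.getD (pq.1 + pq.2 + 1).toNat false = true)) := by
    intro pq hpq
    obtain ⟨h1, h2t⟩ := List.of_mem_zip hpq
    have h2 : pq.2 ∈ L := List.mem_of_mem_tail h2t
    have hp2 : 2 ≤ pq.1 := hge2 _ h1
    have hq2 : 2 ≤ pq.2 := hge2 _ h2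
    have hlt1 : pq.1 < n + 1 := ((hmemL _).mp h1).2.1
    have hlimeq : lim = n + 1 := by rw [hlim, if_pos (by omega)]
    constructor
    · intro hmem
      obtain ⟨hs2, hslt, hf⟩ := (hmemL _).mp hmem
      have hslim : pq.1 + pq.2 + 1 < lim := by omega
      exact ⟨hslim, by rw [hsieve_f _ (by omega) hslim]; exact hf⟩
    · rintro ⟨hslim, hsv⟩
      rw [hsieve_f _ (by omega) hslim] at hsv
      exact (hmemL _).mpr ⟨by omega, by omega, hsv⟩
  have hcount :
      (PySem.List.pyRange 0 ((L.length : Int) - 2) 1).foldl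
        (fun x i =>
          if PySem.List.pyGetD L i 0 + PySem.List.pyGetD L (i + 1) 0 + 1 ∈ L then x + 1 else x)
        (0 : Int)
      = (PySem.List.pyRange 0 ((L.length : Int) - 1) 1).foldl
        (fun x j =>
          if PySem.List.pyGetD L j 0 + PySem.List.pyGetD L (j + 1) 0 + 1 < lim ∧
              sieveF.getD (PySem.List.pyGetD L j 0 + PySem.List.pyGetD L (j + 1) 0 + 1).toNat
                false = true
          then x + 1 else x)
        (0 : Int) := by
    by_cases hnil : L = []
    · rw [hnil]
      simp only [List.length_nil]
      rw [PySem.List.pyRange_one_eq_nil (by omega), PySem.List.pyRange_one_eq_nil (by omega)]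
      rfl
    · have hlen1 : 1 ≤ L.length := by
        have := List.length_pos_of_ne_nil hnil
        omega
      have hrangeA : PySem.List.pyRange 0 ((L.length : Int) - 2) 1
          = PySem.List.pyRange 0 (((L.length - 2 : Nat)) : Int) 1 := by
        rcases Nat.lt_or_ge L.length 2 with h | h
        · rw [PySem.List.pyRange_one_eq_nil (by omega), PySem.List.pyRange_one_eq_nil (by omega)]
        · rw [show ((L.length : Int) - 2) = (((L.length - 2 : Nat)) : Int) by omega]
      have hrangeB : PySem.List.pyRange 0 ((L.length : Int) - 1) 1
          = PySem.List.pyRange 0 (((L.length - 1 : Nat)) : Int) 1 := by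
        rw [show ((L.length : Int) - 1) = (((L.length - 1 : Nat)) : Int) by omega]
      rw [hrangeA, hrangeB,
        foldl_index_pairs L (fun a b => a + b + 1 ∈ L) (L.length - 2) (by omega) 0,
        foldl_index_pairs L
          (fun a b => a + b + 1 < lim ∧ sieveF.getD (a + b + 1).toNat false = true)
          (L.length - 1) (by omega) 0]
      have htakeB : (L.zip L.tail).take (L.length - 1) = L.zip L.tail := by
        apply List.take_of_length_le
        simp [List.length_zip, List.length_tail]
      rw [htakeB]
      have htakeC : ((L.zip L.tail).take (L.length - 2)).countP
            (fun pq => decide (pq.1 + pq.2 + 1 ∈ L))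
          = ((L.zip L.tail).take (L.length - 2)).countP
            (fun pq =>
              decide (pq.1 + pq.2 + 1 < lim ∧
                sieveF.getD (pq.1 + pq.2 + 1).toNat false = true)) := by
        apply List.countP_congr
        intro pq hpq
        simp only [decide_eq_true_eq]
        exact hcond pq (List.mem_of_mem_take hpq)
      rw [htakeC]
      rcases Nat.lt_or_ge L.length 2 with hsmall | hbig
      · have h1 : L.length = 1 := by omega
        have hz : L.zip L.tail = [] := by
          apply List.eq_nil_of_length_eq_zero
          simp [List.length_zip, List.length_tail, h1]
        rw [hz]
        simp
      · have hzlen : (L.zip L.tail).length = L.length - 1 := by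
          simp [List.length_zip, List.length_tail]
        have hidx : L.length - 2 < (L.zip L.tail).length := by omega
        have hdrop : (L.zip L.tail).drop (L.length - 2) = [(L.zip L.tail)[L.length - 2]] := by
          rw [List.drop_eq_getElem_cons hidx]
          have : (L.zip L.tail).drop (L.length - 2 + 1) = [] := List.drop_eq_nil_of_le (by omega)
          rw [this]
        have hlast : (L.zip L.tail)[L.length - 2]'hidx
            = (L[L.length - 2]'(by omega), L[L.length - 1]'(by omega)) := by
          rw [List.getElem_zip]
          congr 1
          rw [List.getElem_tail]
          congr 1
          omega
        have hmax : ∀ x ∈ L, x ≤ L[L.length - 1]'(by omega) := by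
          intro x hx
          obtain ⟨j, hj, rfl⟩ := List.mem_iff_getElem.mp hx
          rcases Nat.lt_or_ge j (L.length - 1) with hlt | hgejj
          · exact (List.pairwise_iff_getElem.mp hsort j (L.length - 1) hj (by omega) hlt).le
          · have hje : j = L.length - 1 := by omega
            subst hje; exact le_refl _
        have hlastpair : ((L[L.length - 2]'(by omega), L[L.length - 1]'(by omega)) :
            Int × Int) ∈ L.zip L.tail := by
          rw [← hlast]
          exact List.getElem_mem _
        have hlastF : ¬ (L[L.length - 2]'(by omega) + L[L.length - 1]'(by omega) + 1 < lim ∧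
            sieveF.getD
              (L[L.length - 2]'(by omega) + L[L.length - 1]'(by omega) + 1).toNat false = true) := by
          intro hc
          have hmem : L[L.length - 2]'(by omega) + L[L.length - 1]'(by omega) + 1 ∈ L :=
            (hcond _ hlastpair).mpr hc
          have hp2 : 2 ≤ L[L.length - 2]'(by omega) := hge2 _ (List.getElem_mem _)
          have := hmax _ hmem
          omega
        rw [zero_add, zero_add, Nat.cast_inj]
        calc ((L.zip L.tail).take (L.length - 2)).countP
              (fun pq => decide (pq.1 + pq.2 + 1 < lim ∧
                sieveF.getD (pq.1 + pq.2 + 1).toNat false = true))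
            = ((L.zip L.tail).take (L.length - 2)).countP
              (fun pq => decide (pq.1 + pq.2 + 1 < lim ∧
                sieveF.getD (pq.1 + pq.2 + 1).toNat false = true))
              + ((L.zip L.tail).drop (L.length - 2)).countP
              (fun pq => decide (pq.1 + pq.2 + 1 < lim ∧
                sieveF.getD (pq.1 + pq.2 + 1).toNat false = true)) := by
              rw [hdrop]
              simp only [List.countP_cons, List.countP_nil, hlast]
              rw [decide_eq_false hlastF]
              simp
          _ = (L.zip L.tail).countP
              (fun pq => decide (pq.1 + pq.2 + 1 < lim ∧
                sieveF.getD (pq.1 + pq.2 + 1).toNat false = true)) := by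
              rw [← List.countP_append, List.take_append_drop]
  rw [hcount]

-- ===== VERDICT =====
theorem solve_spec : Claim_equal_solve := by
  intro n k _
  unfold Spec_solve
  exact solve_spec_aux n k
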